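-- pv_equiv track=rewrite | github.com/priyamgupta09/python-files | HungryFish.py | CalMinMoves
-- ===== SOURCE A (Python) =====
-- def CalMinMoves(key, fishes):
--     fishes.sort()
--     moves=0
--     n=len(fishes)
--     for i in range(len(fishes)):
--         if(moves==n):
--             break
--         c=0
--         while fishes[i] >= key and c<len(fishes[i:]):
--             key=key*2-1
--             c+=1
--         else:
--             if(fishes[i]>=key):
--                 moves+=c
--                 return moves
--             moves+=c
--             key+=fishes[i]
--     return moves
-- ===== SOURCE B (Python) =====
-- def CalMinMoves(key, fishes):
--     fishes.sort()
--     moves = 0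
--     n = len(fishes)
--     for i, f in enumerate(fishes):
--         if moves == n:
--             break
--         if f < key:
--             key += f
--             continue
--         cap = n - i
--         if key <= 1:
--             # key*2-1 never grows past f: the doubling loop exhausts its cap
--             return moves + cap
--         q = -((-f) // (key - 1))            # ceil(f / (key-1))
--         c = (q - 1).bit_length()            # least c with (key-1)*2^c >= f
--         if c > cap:
--             return moves + cap
--         moves += c
--         key = (key - 1) * (1 << c) + 1 + f
--     return moves
-- ===== Notes on version B (the rewrite author's own statement) =====
-- stated objective: faster
-- what changed: B replaces A's inner while-loop (which repeatedly doubles key via key*2-1 and re-slices fishes[i:] on every guard test) by a closed-form step count computed with one ceiling division and bit_length, so each fish is processed in O(1) after the sort.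
import Mathlib
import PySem

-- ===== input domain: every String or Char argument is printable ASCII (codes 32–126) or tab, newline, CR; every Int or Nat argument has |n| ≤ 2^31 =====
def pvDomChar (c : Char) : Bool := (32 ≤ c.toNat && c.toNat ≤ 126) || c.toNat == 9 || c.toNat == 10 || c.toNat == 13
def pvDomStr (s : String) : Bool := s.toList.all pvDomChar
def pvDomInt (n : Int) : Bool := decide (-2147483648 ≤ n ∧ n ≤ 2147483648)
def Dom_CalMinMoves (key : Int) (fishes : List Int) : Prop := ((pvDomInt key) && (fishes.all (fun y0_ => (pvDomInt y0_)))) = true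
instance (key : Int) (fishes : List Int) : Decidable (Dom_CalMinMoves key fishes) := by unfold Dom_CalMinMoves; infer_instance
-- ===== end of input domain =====

-- B replaces A's inner doubling while-loop (whose guard re-slices fishes[i:] each test)
-- by a closed-form ceil-division/bit_length step count; objective: faster.
-- Python A (and B) sort `fishes` in place; the equivalence proved here is about the return value.

-- ===== PORT A =====
-- the inner `while fishes[i] >= key and c < len(fishes[i:])` loop (len(fishes[i:]) = cap)
def CalMinMovesWhile (f key : Int) (c cap : Nat) : Int × Nat :=
  if h : f ≥ key ∧ c < cap then CalMinMovesWhile f (key * 2 - 1) (c + 1) cap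
  else (key, c)
  termination_by cap - c
  decreasing_by omega

-- the for-loop over the sorted list; `rest` is the suffix fishes[i:], so cap = rest.length
def CalMinMovesLoop (rest : List Int) (n key moves : Int) : Int :=
  match rest with
  | [] => moves
  | f :: tl =>
    if moves = n then moves
    else
      let p := CalMinMovesWhile f key 0 (f :: tl).length
      if f ≥ p.1 then moves + (p.2 : Int)
      else CalMinMovesLoop tl n (p.1 + f) (moves + (p.2 : Int))

def CalMinMoves (key : Int) (fishes : List Int) : Int :=
  let sf := PySem.List.sorted fishes (fun x => x) false
  CalMinMovesLoop sf (sf.length : Int) key 0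

-- ===== PORT B =====
def CalMinMovesAltLoop (rest : List Int) (n key moves : Int) : Int :=
  match rest with
  | [] => moves
  | f :: tl =>
    if moves = n then moves
    else if f < key then CalMinMovesAltLoop tl n (key + f) moves
    else
      let cap := (f :: tl).length
      if key ≤ 1 then moves + (cap : Int)
      else
        let q := -(PySem.Int.floordiv (-f) (key - 1))    -- ceil(f / (key-1))
        let c := PySem.Int.bitLength (q - 1)              -- (q-1).bit_length()
        if (c : Int) > (cap : Int) then moves + (cap : Int)
        else CalMinMovesAltLoop tl n ((key - 1) * 2 ^ c + 1 + f) (moves + (c : Int))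

def CalMinMoves_alt (key : Int) (fishes : List Int) : Int :=
  let sf := PySem.List.sorted fishes (fun x => x) false
  CalMinMovesAltLoop sf (sf.length : Int) key 0

-- ===== PRECONDITION & SPEC =====
def Spec_CalMinMoves (key : Int) (fishes : List Int) (out : Int) : Prop := out = CalMinMoves_alt key fishes
instance (key : Int) (fishes : List Int) (out : Int) : Decidable (Spec_CalMinMoves key fishes out) := by unfold Spec_CalMinMoves; infer_instance

-- ===== CLAIM (what is proved, stated in full; the proofs are below) =====
def Claim_equal_CalMinMoves : Prop := ∀ (key : Int) (fishes : List Int), Dom_CalMinMoves key fishes → Spec_CalMinMoves key fishes (CalMinMoves key fishes)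

-- ===== LEMMAS AND PROOFS =====

-- while-loop exit when the guard fails at once
theorem while_exit (f key : Int) (c cap : Nat) (h : ¬ (f ≥ key ∧ c < cap)) :
    CalMinMovesWhile f key c cap = (key, c) := by
  rw [CalMinMovesWhile]; simp [h]

-- key ≤ 1: the doubling never grows past f, so the loop exhausts its cap and f ≥ final key
theorem while_low (f : Int) : ∀ (d : Nat) (key : Int) (c cap : Nat), cap - c = d → c ≤ cap →
    key ≤ 1 → f ≥ key →
    (CalMinMovesWhile f key c cap).2 = cap ∧ f ≥ (CalMinMovesWhile f key c cap).1 := by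
  intro d
  induction d with
  | zero =>
    intro key c cap hd hc h1 hf
    have hcc : c = cap := by omega
    rw [while_exit f key c cap (by omega)]
    exact ⟨hcc, hf⟩
  | succ d ih =>
    intro key c cap hd hc h1 hf
    rw [CalMinMovesWhile]
    have hcond : f ≥ key ∧ c < cap := ⟨hf, by omega⟩
    simp only [hcond]
    exact ih (key * 2 - 1) (c + 1) cap (by omega) (by omega) (by omega) (by omega)

-- key = (k0-1)*2^j + 1 with k0 ≥ 2: closed-form characterisation of the doubling loop,
-- where cm satisfies f ≤ (k0-1)*2^cm and (k0-1)*2^i < f for all i < cm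
theorem while_high (f k0 : Int) (cm : Nat) (hk : 2 ≤ k0)
    (hmin : f ≤ (k0 - 1) * 2 ^ cm) (hlt : ∀ i < cm, (k0 - 1) * 2 ^ i < f) :
    ∀ (d j cap : Nat), cap - j = d → j ≤ cap → j ≤ cm →
    CalMinMovesWhile f ((k0 - 1) * 2 ^ j + 1) j cap =
      if cm ≤ cap then ((k0 - 1) * 2 ^ cm + 1, cm) else ((k0 - 1) * 2 ^ cap + 1, cap) := by
  intro d
  induction d with
  | zero =>
    intro j cap hd hjc hjm
    have hcc : j = cap := by omega
    rw [while_exit _ _ _ _ (by omega)]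
    by_cases h : cm ≤ cap
    · have hcmj : cm = j := by omega
      rw [if_pos h, hcmj]
    · rw [if_neg h, hcc]
  | succ d ih =>
    intro j cap hd hjc hjm
    have hjcap : j < cap := by omega
    by_cases hjcm : j = cm
    · -- guard fails: f < (k0-1)*2^cm + 1
      have hfe : ¬ (f ≥ (k0 - 1) * 2 ^ j + 1 ∧ j < cap) := by
        rintro ⟨hge, -⟩
        rw [hjcm] at hge
        omega
      rw [while_exit _ _ _ _ hfe, hjcm, if_pos (show cm ≤ cap by omega)]
    · have hjlt : j < cm := by omega
      have hgt : (k0 - 1) * 2 ^ j < f := hlt j hjlt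
      rw [CalMinMovesWhile]
      have hcond : f ≥ (k0 - 1) * 2 ^ j + 1 ∧ j < cap := ⟨by omega, hjcap⟩
      simp only [hcond]
      have hkey : ((k0 - 1) * 2 ^ j + 1) * 2 - 1 = (k0 - 1) * 2 ^ (j + 1) + 1 := by ring
      rw [hkey]
      exact ih (j + 1) cap (by omega) (by omega) (by omega)

-- q = ceil(f/(k-1)) bracket: q ≤ x ↔ f ≤ (k-1)*x, for k ≥ 2
theorem ceil_le_iff (f k x : Int) (hk : 2 ≤ k) :
    -(PySem.Int.floordiv (-f) (k - 1)) ≤ x ↔ f ≤ (k - 1) * x := by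
  have hb : (0 : Int) < k - 1 := by omega
  constructor
  · intro h
    have h2 : -x ≤ PySem.Int.floordiv (-f) (k - 1) := by omega
    have := (PySem.Int.le_floordiv_iff_mul_le (q := -x) (a := -f) (b := k - 1) hb).1 h2
    nlinarith
  · intro h
    have h2 : -x * (k - 1) ≤ -f := by nlinarith
    have := (PySem.Int.le_floordiv_iff_mul_le (q := -x) (a := -f) (b := k - 1) hb).2 h2
    omega

-- the ports agree loop step for loop step
theorem loops_eq : ∀ (rest : List Int) (n key moves : Int),
    CalMinMovesLoop rest n key moves = CalMinMovesAltLoop rest n key moves := by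
  intro rest
  induction rest with
  | nil => intro n key moves; rfl
  | cons f tl ih =>
    intro n key moves
    rw [CalMinMovesLoop, CalMinMovesAltLoop]
    by_cases hmn : moves = n
    · simp [hmn]
    · simp only [hmn, if_false]
      by_cases hfk : f < key
      · -- guard false at once: zero doublings
        rw [while_exit f key 0 (f :: tl).length (fun h => absurd h.1 (not_le.mpr hfk))]
        simp [hfk, show ¬ key ≤ f by omega, ih]
      · push_neg at hfk
        simp only [show ¬ f < key by omega, if_false]
        by_cases h1 : key ≤ 1
        · -- loop exhausts its cap and A returns moves + cap
          have hw := while_low f ((f :: tl).length - 0) key 0 (f :: tl).length rfl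
            (by omega) h1 (by omega)
          rw [if_pos hw.2, hw.1, if_pos h1]
        · -- key ≥ 2: closed form
          simp only [h1, if_false]
          have hk : 2 ≤ key := by omega
          set q := -(PySem.Int.floordiv (-f) (key - 1)) with hq
          set cm := PySem.Int.bitLength (q - 1) with hcm
          have hq1 : 1 ≤ q := by
            have hlt0 : PySem.Int.floordiv (-f) (key - 1) < 0 :=
              (PySem.Int.floordiv_lt_iff_lt_mul (show (0:Int) < key - 1 by omega)).mpr
                (by nlinarith)
            omega
          have hna : ((q - 1).natAbs : Int) = q - 1 := Int.natAbs_of_nonneg (by omega)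
          have hmin : f ≤ (key - 1) * 2 ^ cm := by
            rw [← ceil_le_iff f key ((2:Int) ^ cm) hk]
            have h1n := PySem.Int.lt_two_pow_bitLength (q - 1)
            rw [← hcm] at h1n
            have h1' : ((q - 1).natAbs : Int) < (2:Int) ^ cm := by exact_mod_cast h1n
            omega
          have hlt : ∀ i < cm, (key - 1) * 2 ^ i < f := by
            intro i hi
            have hcm1 : q - 1 ≠ 0 := by
              intro h0
              have hc0 : cm = 0 := by rw [hcm, h0]; decide
              omega
            have hle := PySem.Int.two_pow_bitLength_le (q - 1) hcm1
            rw [← hcm] at hle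
            have hq' : (2:Int) ^ (cm - 1) ≤ q - 1 := by
              rw [← hna]; exact_mod_cast hle
            -- so ¬ (q ≤ 2^(cm-1)), hence (key-1)*2^(cm-1) < f, and monotone down to i
            have hnot : ¬ f ≤ (key - 1) * 2 ^ (cm - 1) := by
              intro hco
              have := (ceil_le_iff f key ((2:Int) ^ (cm - 1)) hk).mpr hco
              omega
            push_neg at hnot
            calc (key - 1) * 2 ^ i ≤ (key - 1) * 2 ^ (cm - 1) := by
                  apply mul_le_mul_of_nonneg_left _ (by omega)
                  apply pow_le_pow_right₀ (by norm_num) (by omega)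
              _ < f := hnot
          have hw := while_high f key cm hk hmin hlt ((f :: tl).length - 0) 0
            (f :: tl).length rfl (by omega) (by omega)
          simp only [pow_zero, mul_one, sub_add_cancel] at hw
          rw [hw]
          by_cases hcap : cm ≤ (f :: tl).length
          · -- loop stops early with f < final key: A continues, B continues
            have hnr : ¬ f ≥ (key - 1) * 2 ^ cm + 1 := by omega
            have hnc : ¬ ((tl.length : Int) + 1 < (cm : Int)) := by
              have h' : cm ≤ tl.length + 1 := hcap
              push_neg
              exact_mod_cast h'
            rw [if_pos hcap]
            simp [hnr, hnc, ih]
          · -- cap reached with f still ≥ key: both return moves + cap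
            have hlen : (f :: tl).length = tl.length + 1 := rfl
            have hr : (key - 1) * 2 ^ (tl.length + 1) < f := by
              have h' := hlt (f :: tl).length (by omega)
              rwa [hlen] at h'
            have hc : ((tl.length : Int) + 1) < (cm : Int) := by
              have h' := Nat.lt_of_not_le hcap
              rw [hlen] at h'
              exact_mod_cast h'
            rw [if_neg hcap]
            simp [hc, show (key - 1) * 2 ^ (tl.length + 1) + 1 ≤ f by omega]

-- ===== VERDICT (by name: the statement is the Claim_ definition above) =====
theorem CalMinMoves_spec : Claim_equal_CalMinMoves := by
  intro key fishes _
  unfold Spec_CalMinMoves CalMinMoves CalMinMoves_alt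
  exact loops_eq _ _ _ _
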